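-- pv_equiv track=rewrite | github.com/swazara/bioinformatics-active-learning | Chapter 1/Find DnaA boxes in Salmonella enterica/BA1/BA1e/BetterClumpFinder.py | ComputeFrequenciesRolling
-- ===== SOURCE A (Python) =====
-- def get_val(symbol):
--     mapping = {'A': 0, 'C': 1, 'G': 2, 'T': 3}
--     return mapping.get(symbol.upper(), 0)
--
-- def patternToNumber(pattern):
--     number = 0
--     for char in pattern:
--         number = (number * 4) + get_val(char)
--     return number
--
-- def ComputeFrequenciesRolling(text, k):
--     """
--     Calcula frecuencias de k-mers en un texto usando Rolling Hash.
--     """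
--     frecuencias = [0] * (4**k)
--     n = len(text)
--     if n < k: return frecuencias
--
--     # Primer k-mer calculado de forma completa
--     current_idx = patternToNumber(text[0:k])
--     frecuencias[current_idx] += 1
--
--     # Precalculamos el valor para remover el primer nucleótido (4^(k-1))
--     mask = 4**(k - 1)
--
--     # El resto se calcula "reciclando" el índice anterior
--     for i in range(1, n - k + 1):
--         # Rolling Hash: Quitar primero, desplazar, añadir nuevo
--         current_idx = ((current_idx % mask) * 4) + get_val(text[i + k - 1])
--         frecuencias[current_idx] += 1
--
--     return frecuencias
-- ===== SOURCE B (Python) =====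
-- def get_val(symbol):
--     mapping = {'A': 0, 'C': 1, 'G': 2, 'T': 3}
--     return mapping.get(symbol.upper(), 0)
--
-- def patternToNumber(pattern):
--     number = 0
--     for char in pattern:
--         number = (number * 4) + get_val(char)
--     return number
--
-- def ComputeFrequenciesRolling(text, k):
--     """Count k-mer pattern numbers in a dict, then emit the frequency array."""
--     counts = {}
--     for i in range(len(text) - k + 1):
--         idx = patternToNumber(text[i:i + k])
--         counts[idx] = counts.get(idx, 0) + 1
--     return [counts.get(j, 0) for j in range(4 ** k)]
-- ===== Notes on version B (the rewrite author's own statement) =====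
-- stated objective: simpler
-- what changed: Replaces the rolling-hash state machine and in-place frequency array with a plain per-window recomputation into a counting dict, then emits the array as a comprehension over range(4**k); the early return for n<k disappears because the loop is simply empty.
import Mathlib
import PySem

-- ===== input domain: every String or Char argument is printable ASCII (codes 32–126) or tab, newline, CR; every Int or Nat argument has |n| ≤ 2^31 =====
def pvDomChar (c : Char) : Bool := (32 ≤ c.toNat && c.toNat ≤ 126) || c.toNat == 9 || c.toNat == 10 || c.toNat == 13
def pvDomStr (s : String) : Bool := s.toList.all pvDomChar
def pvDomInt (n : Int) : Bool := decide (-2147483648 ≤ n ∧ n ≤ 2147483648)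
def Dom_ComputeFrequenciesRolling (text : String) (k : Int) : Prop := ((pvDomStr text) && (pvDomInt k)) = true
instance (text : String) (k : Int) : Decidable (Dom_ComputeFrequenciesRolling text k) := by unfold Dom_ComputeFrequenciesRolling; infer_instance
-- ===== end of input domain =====

-- B drops A's rolling-hash state and in-place array: it recomputes each window's pattern
-- number into a counting dict and emits the frequency list as a map over range(4**k) (objective: simpler).


-- ===== PORT A =====
-- get_val(symbol): dict lookup of symbol.upper() with default 0 (helper of both A and B)
def pvGetVal (c : Char) : Int :=
  PySem.Dict.getD (PySem.Dict.ofList [('A', 0), ('C', 1), ('G', 2), ('T', 3)]) (PySem.Chars.upperChar c) 0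

-- patternToNumber(pattern) (helper of both A and B)
def pvPatternToNumber (pattern : List Char) : Int :=
  pattern.foldl (fun number c => number * 4 + pvGetVal c) 0

-- frecuencias[i] += 1 ; exact because on every admitted input 0 ≤ i < frecuencias.length
def pvInc (fr : List Int) (i : Int) : List Int :=
  fr.set i.toNat (fr.getD i.toNat 0 + 1)

def ComputeFrequenciesRolling (text : String) (k : Int) : List Int :=
  let cs := text.toList
  let frec0 : List Int := List.replicate (4 ^ k.toNat) 0     -- [0] * (4**k); k ≥ 0 inside Pre_
  let n : Int := cs.length
  if n < k then frec0
  else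
    let idx0 := pvPatternToNumber (PySem.List.slice cs (some 0) (some k))
    let frec1 := pvInc frec0 idx0
    let mask : Int := (4:Int) ^ (k - 1).toNat    -- 4**(k-1); inside Pre_ the loop below runs only when k ≥ 1
    ((PySem.List.pyRange 1 (n - k + 1) 1).foldl
      (fun (s : Int × List Int) i =>
        let idx := PySem.Int.mod s.1 mask * 4 + pvGetVal (PySem.List.pyGetD cs (i + k - 1) ' ')
        (idx, pvInc s.2 idx)) (idx0, frec1)).2

-- ===== PORT B =====
def ComputeFrequenciesRolling_alt (text : String) (k : Int) : List Int :=
  let cs := text.toList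
  let counts := (PySem.List.pyRange 0 ((cs.length : Int) - k + 1) 1).foldl
    (fun (d : PySem.Dict Int Int) i =>
      let idx := pvPatternToNumber (PySem.List.slice cs (some i) (some (i + k)))
      d.insert idx (d.getD idx 0 + 1)) PySem.Dict.empty
  (PySem.List.pyRange 0 ((4:Int) ^ k.toNat) 1).map (fun j => counts.getD j 0)

-- ===== PRECONDITION & SPEC =====
-- Pre_ excludes exactly the inputs on which A raises: k < 0 (`[0]*(4**k)` raises TypeError on
-- the float 4**k), k = 0 with nonempty text (the float mask 4**(k-1) makes the first loop
-- iteration raise TypeError), and k ≥ 16 (the allocation `[0]*(4**k)`, ≥ 4^16 entries, raises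
-- MemoryError); the only k = 0 input on which A returns, the empty text, is kept inside.
def Pre_ComputeFrequenciesRolling (text : String) (k : Int) : Prop :=
  (1 ≤ k ∧ k ≤ 15) ∨ (k = 0 ∧ text = "")
instance (text : String) (k : Int) : Decidable (Pre_ComputeFrequenciesRolling text k) := by
  unfold Pre_ComputeFrequenciesRolling; infer_instance

def pvWitness_ComputeFrequenciesRolling : String × Int := ("ACGTAC", 2)

def Spec_ComputeFrequenciesRolling (text : String) (k : Int) (out : List Int) : Prop := out = ComputeFrequenciesRolling_alt text k
instance (text : String) (k : Int) (out : List Int) : Decidable (Spec_ComputeFrequenciesRolling text k out) := by unfold Spec_ComputeFrequenciesRolling; infer_instance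

-- ===== CLAIM (what is proved, stated in full; the proofs are below) =====
def Claim_equal_ComputeFrequenciesRolling : Prop := ∀ (text : String) (k : Int), Dom_ComputeFrequenciesRolling text k → Pre_ComputeFrequenciesRolling text k → Spec_ComputeFrequenciesRolling text k (ComputeFrequenciesRolling text k)

-- ===== LEMMAS AND PROOFS =====

-- the pattern number of the window starting at i (B's per-window value)
def pvG (cs : List Char) (k i : Int) : Int :=
  pvPatternToNumber (PySem.List.slice cs (some i) (some (i + k)))

lemma pvGetVal_bounds (c : Char) : 0 ≤ pvGetVal c ∧ pvGetVal c < 4 := by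
  have h : (PySem.Dict.ofList [('A', 0), ('C', 1), ('G', 2), ('T', 3)] : PySem.Dict Char Int).items
      = [('A', 0), ('C', 1), ('G', 2), ('T', 3)] := by decide
  unfold pvGetVal
  simp [PySem.Dict.getD, PySem.Dict.get?, h, List.find?]
  repeat' split
  all_goals simp

lemma pvPatternToNumber_aux (l : List Char) (a : Int) :
    l.foldl (fun number c => number * 4 + pvGetVal c) a
      = a * 4 ^ l.length + pvPatternToNumber l := by
  induction l generalizing a with
  | nil => simp [pvPatternToNumber]
  | cons c t ih =>
    simp only [List.foldl_cons, List.length_cons, pvPatternToNumber]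
    rw [ih (a * 4 + pvGetVal c), ih (0 * 4 + pvGetVal c)]
    ring

lemma pvPatternToNumber_bounds (l : List Char) :
    0 ≤ pvPatternToNumber l ∧ pvPatternToNumber l < 4 ^ l.length := by
  induction l with
  | nil => simp [pvPatternToNumber]
  | cons c t ih =>
    have hc := pvGetVal_bounds c
    have h4 : (0:Int) < 4 ^ t.length := by positivity
    have := pvPatternToNumber_aux t (0 * 4 + pvGetVal c)
    simp only [pvPatternToNumber, List.foldl_cons] at *
    rw [this]
    constructor
    · nlinarith
    · rw [List.length_cons] at *
      nlinarith [pow_succ (4:Int) t.length]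

lemma pvPatternToNumber_cons (c : Char) (l : List Char) :
    pvPatternToNumber (c :: l) = pvGetVal c * 4 ^ l.length + pvPatternToNumber l := by
  simp only [pvPatternToNumber, List.foldl_cons]
  rw [pvPatternToNumber_aux]
  simp only [pvPatternToNumber]
  ring

lemma pvPatternToNumber_snoc (l : List Char) (c : Char) :
    pvPatternToNumber (l ++ [c]) = pvPatternToNumber l * 4 + pvGetVal c := by
  simp [pvPatternToNumber, List.foldl_append]

lemma pvG_eq_take (cs : List Char) (k i : Int) (h0 : 0 ≤ i) (hk : 0 ≤ k) :
    pvG cs k i = pvPatternToNumber ((cs.drop i.toNat).take k.toNat) := by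
  unfold pvG
  rw [PySem.List.slice_toNat cs h0 (by omega)]
  congr 2
  omega

lemma pvG_bounds (cs : List Char) (k i : Int) (h0 : 0 ≤ i) (hk : 0 ≤ k) :
    0 ≤ pvG cs k i ∧ pvG cs k i < 4 ^ k.toNat := by
  rw [pvG_eq_take cs k i h0 hk]
  obtain ⟨h1, h2⟩ := pvPatternToNumber_bounds ((cs.drop i.toNat).take k.toNat)
  refine ⟨h1, lt_of_lt_of_le h2 ?_⟩
  exact pow_le_pow_right₀ (by norm_num) (by simp [List.length_take])

-- rolling identity: the rolling update applied to window i-1 yields window i's pattern number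
lemma pvRoll (cs : List Char) (k i : Int) (hk : 1 ≤ k) (hi : 1 ≤ i)
    (hin : i + k ≤ (cs.length : Int)) :
    PySem.Int.mod (pvG cs k (i - 1)) ((4:Int) ^ (k - 1).toNat) * 4
        + pvGetVal (PySem.List.pyGetD cs (i + k - 1) ' ')
      = pvG cs k i := by
  obtain ⟨K, hK⟩ : ∃ K, K = k.toNat := ⟨_, rfl⟩
  obtain ⟨j, hj⟩ : ∃ j, j = i.toNat := ⟨_, rfl⟩
  have hjn : j - 1 < cs.length := by omega
  have hjKn : j + (K - 1) < cs.length := by omega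
  have hmid : ((cs.drop j).take (K - 1)).length = K - 1 := by
    simp [List.length_take, List.length_drop]; omega
  -- window i-1 = cs[j-1] :: mid
  have hw1 : (cs.drop (j - 1)).take K = cs[j - 1] :: (cs.drop j).take (K - 1) := by
    rw [List.drop_eq_getElem_cons hjn]
    have h1 : j - 1 + 1 = j := by omega
    rw [h1]
    have h2 : K = (K - 1) + 1 := by omega
    rw [h2, List.take_succ_cons]
    simp
  -- window i = mid ++ [cs[j + (K-1)]]
  have hw2 : (cs.drop j).take K = (cs.drop j).take (K - 1) ++ [cs[j + (K - 1)]] := by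
    have hlt : K - 1 < (cs.drop j).length := by simp [List.length_drop]; omega
    have h2 : K = (K - 1) + 1 := by omega
    conv_lhs => rw [h2]
    rw [List.take_add_one, List.getElem?_eq_getElem hlt]
    simp [List.getElem_drop]
  have hg1 : pvG cs k (i - 1) = pvPatternToNumber ((cs.drop (j - 1)).take K) := by
    rw [pvG_eq_take cs k (i - 1) (by omega) (by omega),
        show (i - 1).toNat = j - 1 by omega, show k.toNat = K from hK.symm]
  have hg2 : pvG cs k i = pvPatternToNumber ((cs.drop j).take K) := by
    rw [pvG_eq_take cs k i (by omega) (by omega),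
        show i.toNat = j from hj.symm, show k.toNat = K from hK.symm]
  have hchar : PySem.List.pyGetD cs (i + k - 1) ' ' = cs[j + (K - 1)] := by
    have h3 : i + k - 1 = ((j + (K - 1) : Nat) : Int) := by omega
    rw [h3, PySem.List.pyGetD_natCast]
    exact List.getD_eq_getElem cs ' ' hjKn
  obtain ⟨hm0, hmlt⟩ := pvPatternToNumber_bounds ((cs.drop j).take (K - 1))
  rw [hmid] at hmlt
  have hMpos : (0:Int) < 4 ^ (K - 1) := by positivity
  have hKk : (k - 1).toNat = K - 1 := by omega
  rw [hg1, hg2, hw1, hw2, pvPatternToNumber_cons, pvPatternToNumber_snoc, hchar, hmid, hKk]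
  have hmod : PySem.Int.mod
      (pvGetVal cs[j - 1] * 4 ^ (K - 1) + pvPatternToNumber ((cs.drop j).take (K - 1)))
      ((4:Int) ^ (K - 1)) = pvPatternToNumber ((cs.drop j).take (K - 1)) := by
    rw [PySem.Int.mod_eq_emod_of_pos hMpos]
    rw [show pvGetVal cs[j - 1] * 4 ^ (K - 1) + pvPatternToNumber ((cs.drop j).take (K - 1))
        = pvPatternToNumber ((cs.drop j).take (K - 1)) + 4 ^ (K - 1) * pvGetVal cs[j - 1] by ring]
    rw [Int.add_mul_emod_self_left]
    exact Int.emod_eq_of_lt hm0 hmlt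
  rw [hmod]

-- A's rolling loop, started on the correct carried index, increments exactly at pvG of each i
lemma pvLoop (cs : List Char) (k : Int) (hk : 1 ≤ k) :
    ∀ (c : Nat) (i0 : Int) (fr : List Int), 1 ≤ i0 →
      i0 + c = (cs.length : Int) - k + 1 →
      ((PySem.List.pyRange i0 ((cs.length : Int) - k + 1) 1).foldl
        (fun (s : Int × List Int) i =>
          let idx := PySem.Int.mod s.1 ((4:Int) ^ (k - 1).toNat) * 4
              + pvGetVal (PySem.List.pyGetD cs (i + k - 1) ' ')
          (idx, pvInc s.2 idx)) (pvG cs k (i0 - 1), fr)).2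
      = (PySem.List.pyRange i0 ((cs.length : Int) - k + 1) 1).foldl
          (fun fr i => pvInc fr (pvG cs k i)) fr := by
  intro c
  induction c with
  | zero =>
    intro i0 fr h1 h2
    rw [PySem.List.pyRange_one_eq_nil (by omega)]
    simp
  | succ m ih =>
    intro i0 fr h1 h2
    rw [PySem.List.pyRange_one_cons (by omega)]
    simp only [List.foldl_cons]
    have hroll := pvRoll cs k i0 hk h1 (by omega)
    rw [hroll]
    have := ih (i0 + 1) (pvInc fr (pvG cs k i0)) (by omega) (by omega)
    have hsub : i0 + 1 - 1 = i0 := by omega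
    rw [hsub] at this
    exact this

lemma pvInc_length (fr : List Int) (x : Int) : (pvInc fr x).length = fr.length := by
  simp [pvInc]

lemma pvFoldInc_length (idxs : List Int) (fr : List Int) :
    (idxs.foldl pvInc fr).length = fr.length := by
  induction idxs generalizing fr with
  | nil => rfl
  | cons x t ih => rw [List.foldl_cons, ih, pvInc_length]

lemma pvFoldInc_getD (idxs : List Int) (fr : List Int)
    (h : ∀ x ∈ idxs, 0 ≤ x ∧ x.toNat < fr.length) (j : Nat) :
    (idxs.foldl pvInc fr).getD j 0 = fr.getD j 0 + idxs.count ((j : Nat) : Int) := by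
  induction idxs generalizing fr with
  | nil => simp
  | cons x t ih =>
    obtain ⟨hx0, hxlt⟩ := h x (by simp)
    rw [List.foldl_cons, ih (pvInc fr x)
      (fun y hy => by rw [pvInc_length]; exact h y (by simp [hy])), List.count_cons]
    have hgetD : (pvInc fr x).getD j 0 = fr.getD j 0 + if ((j:Nat):Int) = x then 1 else 0 := by
      unfold pvInc
      by_cases hje : j = x.toNat
      · subst hje
        rw [List.getD_eq_getElem _ _ (by rwa [List.length_set]),
            List.getElem_set_self, List.getD_eq_getElem _ _ hxlt]
        simp
        omega
      · have hne : ¬ ((j:Nat):Int) = x := by omega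
        have hne2 : x.toNat ≠ j := fun hh => hje hh.symm
        rw [List.getD_eq_getElem?_getD, List.getD_eq_getElem?_getD, List.getElem?_set]
        simp [hne2, hne]
    rw [hgetD]
    by_cases hx : ((j:Nat):Int) = x
    · simp [hx]
      ring
    · have hx' : ¬ x = ((j:Nat):Int) := fun h => hx h.symm
      simp [hx, hx']

-- ===== VERDICT (by name: the statement is the Claim_ definition above) =====
lemma pvMain (text : String) (k : Int) (hk : 1 ≤ k) :
    ComputeFrequenciesRolling text k = ComputeFrequenciesRolling_alt text k := by
  unfold ComputeFrequenciesRolling ComputeFrequenciesRolling_alt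
  dsimp only
  generalize text.toList = cs
  have hcast : ((4 ^ k.toNat : Nat) : Int) = (4:Int) ^ k.toNat := by push_cast; ring
  by_cases hn : (cs.length : Int) < k
  · rw [if_pos hn]
    rw [PySem.List.pyRange_one_eq_nil (show (cs.length : Int) - k + 1 ≤ 0 by omega)]
    rw [← hcast, PySem.List.pyRange_one]
    simp [Function.comp_def, List.map_const']
    have h4 : ((4:Int) ^ k.toNat).toNat = 4 ^ k.toNat := by
      rw [← hcast, Int.toNat_natCast]
    exact h4.symm
  · rw [if_neg hn]
    -- A's loop: rolling state replaced by per-window pattern numbers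
    have hidx0 : pvPatternToNumber (PySem.List.slice cs (some 0) (some k)) = pvG cs k 0 := by
      unfold pvG
      norm_num
    rw [hidx0]
    have hM : (1:Int) + ((cs.length : Int) - k).toNat = (cs.length : Int) - k + 1 := by omega
    have hloop := pvLoop cs k hk ((cs.length : Int) - k).toNat 1
      (pvInc (List.replicate (4 ^ k.toNat) 0) (pvG cs k 0)) (by omega) hM
    rw [show (1:Int) - 1 = 0 by norm_num] at hloop
    rw [hloop]
    have hcons : PySem.List.pyRange 0 ((cs.length : Int) - k + 1) 1
        = 0 :: PySem.List.pyRange 1 ((cs.length : Int) - k + 1) 1 := by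
      rw [PySem.List.pyRange_one_cons (by omega)]
      norm_num
    rw [show List.foldl (fun fr i => pvInc fr (pvG cs k i))
          (pvInc (List.replicate (4 ^ k.toNat) 0) (pvG cs k 0))
          (PySem.List.pyRange 1 ((cs.length : Int) - k + 1) 1)
        = List.foldl (fun fr i => pvInc fr (pvG cs k i)) (List.replicate (4 ^ k.toNat) 0)
          (PySem.List.pyRange 0 ((cs.length : Int) - k + 1) 1) from by
      rw [hcons, List.foldl_cons]]
    -- both sides as functions of the window list idxs
    have hA : List.foldl (fun fr i => pvInc fr (pvG cs k i)) (List.replicate (4 ^ k.toNat) 0)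
          (PySem.List.pyRange 0 ((cs.length : Int) - k + 1) 1)
        = List.foldl pvInc (List.replicate (4 ^ k.toNat) 0)
          ((PySem.List.pyRange 0 ((cs.length : Int) - k + 1) 1).map (pvG cs k)) := by
      simp [List.foldl_map]
    have hB : List.foldl (fun (d : PySem.Dict Int Int) i =>
            d.insert (pvPatternToNumber (PySem.List.slice cs (some i) (some (i + k))))
              (d.getD (pvPatternToNumber (PySem.List.slice cs (some i) (some (i + k)))) 0 + 1))
          PySem.Dict.empty (PySem.List.pyRange 0 ((cs.length : Int) - k + 1) 1)
        = PySem.Dict.counter ((PySem.List.pyRange 0 ((cs.length : Int) - k + 1) 1).map (pvG cs k)) := by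
      rw [← PySem.Dict.foldl_insert_getD_add_one_eq_counter]
      simp [List.foldl_map, pvG]
    rw [hA, hB]
    generalize hidxs : (PySem.List.pyRange 0 ((cs.length : Int) - k + 1) 1).map (pvG cs k) = idxs
    have hbnd : ∀ x ∈ idxs, 0 ≤ x ∧ x.toNat < (List.replicate (4 ^ k.toNat) (0:Int)).length := by
      intro x hx
      rw [← hidxs] at hx
      obtain ⟨i, hi, hgi⟩ := List.mem_map.mp hx
      rw [PySem.List.mem_pyRange_one] at hi
      obtain ⟨h0, h1⟩ := pvG_bounds cs k i hi.1 (by omega)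
      rw [hgi] at h0 h1
      rw [← hcast] at h1
      simp only [List.length_replicate]
      omega
    apply List.ext_getElem
    · rw [pvFoldInc_length, List.length_replicate, List.length_map,
        PySem.List.length_pyRange_one, Int.sub_zero, ← hcast, Int.toNat_natCast]
    · intro j hj1 hj2
      rw [pvFoldInc_length, List.length_replicate] at hj1
      rw [← List.getD_eq_getElem _ 0 (by rw [pvFoldInc_length, List.length_replicate]; exact hj1)]
      rw [pvFoldInc_getD idxs _ hbnd j]
      rw [List.getElem_map, PySem.List.getElem_pyRange_one, PySem.Dict.getD_counter]
      simp

theorem ComputeFrequenciesRolling_spec : Claim_equal_ComputeFrequenciesRolling := by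
  intro text k _ hpre
  unfold Spec_ComputeFrequenciesRolling
  rcases hpre with ⟨hk, _⟩ | ⟨hk0, htext⟩
  · exact pvMain text k hk
  · subst hk0
    subst htext
    decide
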